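-- pv_equiv track=rewrite | github.com/25th-Night/coding-test | 프로그래머스/1/68935. 3진법 뒤집기/3진법 뒤집기.py | solution
-- ===== SOURCE A (Python) =====
-- def solution(n):
--     result = ""
--     while n:
--         n, r = divmod(n, 3)
--         result += str(r)
--     num = 0
--     for i, n in enumerate(result):
--         num += 3**(len(result)-1-i) * int(n)
--     return num
-- ===== SOURCE B (Python) =====
-- def solution(n):
--     num = 0
--     while n:
--         n, r = divmod(n, 3)
--         num = num * 3 + r
--     return num
-- ===== Notes on version B (the rewrite author's own statement) =====
-- stated objective: faster
-- what changed: Single Horner-style while-loop (num = num*3 + r while peeling base-3 digits) replaces A's two passes that build a digit string and then re-weight each character with 3**k; Pre_ requires 0 <= n since both programs loop forever on negative n.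
import Mathlib
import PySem

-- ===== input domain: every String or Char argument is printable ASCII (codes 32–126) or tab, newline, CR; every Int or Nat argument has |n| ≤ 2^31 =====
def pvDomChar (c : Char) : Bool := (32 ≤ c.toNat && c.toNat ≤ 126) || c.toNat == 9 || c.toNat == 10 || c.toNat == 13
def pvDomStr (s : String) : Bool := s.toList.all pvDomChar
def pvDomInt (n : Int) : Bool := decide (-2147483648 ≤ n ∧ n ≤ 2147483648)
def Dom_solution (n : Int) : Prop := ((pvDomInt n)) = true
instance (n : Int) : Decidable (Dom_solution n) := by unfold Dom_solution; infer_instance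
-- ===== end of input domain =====

-- B fuses A's two passes (build a base-3 digit string, then re-weight with 3**k) into one
-- Horner-style accumulator loop; Pre_ requires 0 ≤ n (both loops diverge on negative n).

-- ===== PORT A =====
-- while n: n, r = divmod(n, 3); result += str(r)
-- (the 'n < 0' branch only makes the recursion total: Python diverges there, excluded by Pre_)
def aLoop (n : Int) (result : List Char) : List Char :=
  if n = 0 then result
  else if n < 0 then result
  else aLoop (PySem.Int.floordiv n 3) (result ++ PySem.Int.toChars (PySem.Int.mod n 3))
termination_by n.toNat
decreasing_by
  have h3 : PySem.Int.floordiv n 3 = n / 3 := PySem.Int.floordiv_eq_ediv_of_pos (by omega)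
  rw [h3]; omega

-- for i, n in enumerate(result): num += 3**(len(result)-1-i) * int(n)
-- each char is a base-3 digit, so int(ch) = (ofChars? [ch]).getD 0 is exact (never none);
-- the index i satisfies 0 ≤ i < len, so Nat subtraction in len-1-i matches Python's int
def aSum (result : List Char) : Int :=
  (PySem.List.enumerate result 0).foldl
    (fun num p => num + (3:Int) ^ (result.length - 1 - p.1.toNat) * ((PySem.Int.ofChars? [p.2]).getD 0)) 0

def solution (n : Int) : Int := aSum (aLoop n [])

-- ===== PORT B =====
-- while n: n, r = divmod(n, 3); num = num*3 + r   (same totality guard for n < 0)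
def bLoop (n : Int) (num : Int) : Int :=
  if n = 0 then num
  else if n < 0 then num
  else bLoop (PySem.Int.floordiv n 3) (num * 3 + PySem.Int.mod n 3)
termination_by n.toNat
decreasing_by
  have h3 : PySem.Int.floordiv n 3 = n / 3 := PySem.Int.floordiv_eq_ediv_of_pos (by omega)
  rw [h3]; omega

def solution_alt (n : Int) : Int := bLoop n 0

-- ===== PRECONDITION & SPEC =====
-- Python A (and B) loop forever on negative n, so those inputs are outside Pre_
def Pre_solution (n : Int) : Prop := 0 ≤ n
instance (n : Int) : Decidable (Pre_solution n) := by unfold Pre_solution; infer_instance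
def pvWitness_solution : Int := (45)

def Spec_solution (n : Int) (out : Int) : Prop := out = solution_alt n
instance (n : Int) (out : Int) : Decidable (Spec_solution n out) := by unfold Spec_solution; infer_instance

-- ===== CLAIM (what is proved, stated in full; the proofs are below) =====
def Claim_equal_solution : Prop := ∀ (n : Int), Dom_solution n → Pre_solution n → Spec_solution n (solution n)

-- ===== LEMMAS AND PROOFS =====

-- the base-3 digit list of n, least significant first
def digs (n : Int) : List Int :=
  if h : 0 < n then PySem.Int.mod n 3 :: digs (PySem.Int.floordiv n 3) else []
termination_by n.toNat
decreasing_by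
  have h3 : PySem.Int.floordiv n 3 = n / 3 := PySem.Int.floordiv_eq_ediv_of_pos (by omega)
  rw [h3]; omega

def chDig (d : Int) : Char := if d = 0 then '0' else if d = 1 then '1' else '2'

lemma digs_bounded : ∀ (n : Int), ∀ d ∈ digs n, d = 0 ∨ d = 1 ∨ d = 2 := by
  intro n
  induction n using digs.induct with
  | case1 n h ih =>
    rw [digs, dif_pos h]
    intro d hd
    rcases List.mem_cons.mp hd with h0 | h0
    · subst h0
      have h1 := PySem.Int.mod_nonneg n (b := 3) (by omega)
      have h2 := PySem.Int.mod_lt n (b := 3) (by omega)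
      omega
    · exact ih d h0
  | case2 n h =>
    rw [digs, dif_neg h]; intro d hd; simp at hd

lemma toChars_digit (d : Int) (h : d = 0 ∨ d = 1 ∨ d = 2) :
    PySem.Int.toChars d = [chDig d] := by
  rcases h with h | h | h <;> subst h <;> decide

lemma aLoop_eq (n : Int) : ∀ (result : List Char) (_ : 0 ≤ n),
    aLoop n result = result ++ (digs n).map chDig := by
  induction n using digs.induct with
  | case1 n h ih =>
    intro result _
    rw [aLoop, if_neg (by omega), if_neg (by omega), digs, dif_pos h]
    have hd : PySem.Int.mod n 3 = 0 ∨ PySem.Int.mod n 3 = 1 ∨ PySem.Int.mod n 3 = 2 := by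
      have h1 := PySem.Int.mod_nonneg n (b := 3) (by omega)
      have h2 := PySem.Int.mod_lt n (b := 3) (by omega)
      omega
    have hq : (0:Int) ≤ PySem.Int.floordiv n 3 := by
      rw [PySem.Int.floordiv_eq_ediv_of_pos (by omega)]; omega
    rw [ih _ hq, toChars_digit _ hd]
    simp
  | case2 n h =>
    intro result hn
    have hn0 : n = 0 := by omega
    subst hn0
    rw [aLoop, if_pos rfl, digs, dif_neg (by omega)]
    simp

lemma bLoop_eq (n : Int) : ∀ (num : Int) (_ : 0 ≤ n),
    bLoop n num = (digs n).foldl (fun a d => a * 3 + d) num := by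
  induction n using digs.induct with
  | case1 n h ih =>
    intro num _
    rw [bLoop, if_neg (by omega), if_neg (by omega), digs, dif_pos h]
    have hq : (0:Int) ≤ PySem.Int.floordiv n 3 := by
      rw [PySem.Int.floordiv_eq_ediv_of_pos (by omega)]; omega
    rw [ih _ hq]
    simp
  | case2 n h =>
    intro num hn
    have hn0 : n = 0 := by omega
    subst hn0
    rw [bLoop, if_pos rfl, digs, dif_neg (by omega)]
    simp

-- value of a single digit char as A's int() reads it
lemma ofChars_chDig (d : Int) (h : d = 0 ∨ d = 1 ∨ d = 2) :
    (PySem.Int.ofChars? [chDig d]).getD 0 = d := by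
  rcases h with h | h | h <;> subst h <;> decide

-- the weighted-sum pass over the digit string equals Horner over the digit list
lemma sum_eq_horner : ∀ (ds : List Int), (∀ d ∈ ds, d = 0 ∨ d = 1 ∨ d = 2) →
    aSum (ds.map chDig) = ds.foldl (fun a d => a * 3 + d) 0 := by
  intro ds
  induction ds using List.reverseRecOn with
  | nil => intro _; simp [aSum, PySem.List.enumerate_nil]
  | append_singleton ds d ih =>
    intro hds
    have hd : d = 0 ∨ d = 1 ∨ d = 2 := hds d (by simp)
    have hds' : ∀ x ∈ ds, x = 0 ∨ x = 1 ∨ x = 2 := fun x hx => hds x (by simp [hx])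
    have hih := ih hds'
    unfold aSum at hih ⊢
    rw [PySem.List.foldl_add] at hih ⊢
    rw [List.map_append]
    simp only [List.map_cons, List.map_nil]
    rw [PySem.List.enumerate_append, PySem.List.enumerate_cons,
      PySem.List.enumerate_nil, List.map_append, List.sum_append]
    simp only [List.length_append, List.length_map, List.length_cons,
      List.length_nil, List.map_cons, List.map_nil, List.sum_cons, List.sum_nil]
    have hcg : List.map
        (fun p : Int × Char => (3:Int) ^ (ds.length + 1 - 1 - p.1.toNat) * ((PySem.Int.ofChars? [p.2]).getD 0))
        (PySem.List.enumerate (ds.map chDig) 0)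
      = List.map (fun p : Int × Char => 3 * ((3:Int) ^ (ds.length - 1 - p.1.toNat) * ((PySem.Int.ofChars? [p.2]).getD 0)))
        (PySem.List.enumerate (ds.map chDig) 0) := by
      apply List.map_congr_left
      intro p hp
      rcases (PySem.List.mem_enumerate_iff _ _ _).mp hp with ⟨k, hk, rfl⟩
      simp only [List.length_map] at hk
      have h1 : ((0 + (k:Int)).toNat) = k := by omega
      have h2 : ds.length + 1 - 1 - k = (ds.length - 1 - k) + 1 := by omega
      rw [h1, h2, pow_succ]
      ring
    rw [hcg, List.sum_map_mul_left]
    rw [List.foldl_append]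
    simp only [List.foldl_cons, List.foldl_nil]
    have h0 : ds.length + 1 - 1 - ((0:Int) + (ds.length:Int)).toNat = 0 := by omega
    rw [h0, pow_zero, one_mul, ofChars_chDig d hd]
    simp only [List.length_map] at hih
    linarith [hih]

-- ===== VERDICT (by name: the statement is the Claim_ definition above) =====
theorem solution_spec : Claim_equal_solution := by
  intro n _ hn
  unfold Spec_solution
  show solution n = solution_alt n
  unfold solution solution_alt
  rw [aLoop_eq n [] hn, bLoop_eq n 0 hn, List.nil_append,
    sum_eq_horner (digs n) (digs_bounded n)]
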